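-- pv_equiv track=rewrite | github.com/alexoliveiraFGV24/paa-lista2 | lista-2-paa.py | problema_5
-- ===== SOURCE A (Python) =====
-- from typing import List, Tuple
--
-- def problema_5(blocos: List[int]) -> int:
--     """
--     Você recebeu $n$ blocos de madeira e seu desafio é empilhá-los, formando
--     o menor número possível de torres, seguindo duas regras:
--     1. Um bloco só pode ser colocado sobre outro se o seu tamanho for menor ou
--        igual ao do bloco inferior.
--     2. Os blocos devem ser processados um a um, na sequência predefinida em
--        que são apresentados.
--
--     A cada bloco, você deve decidir se o coloca no topo de uma torre existente
--     ou se inicia uma nova torre com ele. O algoritmo deve encontrar o número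
--     mínimo de torres necessárias com complexidade $O(n \log n)$.
--     """
--
--     # Ideia: Fazer um "hash", mas colocando apenas o topo da torre
--     # e contando quando devemos adicionar uma nova torre
--
--     # Função auxiliar para, dada um array ordenado, retornar o índice mais a direita
--     # que um elemento x será adicionado na lista em O(logn)
--
--     def adicionar_mais_a_direita(arr, x):
--         inicio = 0
--         fim = len(arr)
--         while inicio < fim:
--             meio = (inicio + fim) // 2
--             if x < arr[meio]:
--                 fim = meio
--             else:
--                 inicio = meio + 1
--         return inicio
--
--     min_torres = []
--
--     for bloco in blocos:  # Para todos os blocos da lista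
--         i = adicionar_mais_a_direita(min_torres, -bloco)  # Pego o índice mais a direita (O(logn))
--         if i < len(min_torres):  # Verifico se preciso adicionar uma nova torre
--             min_torres[i] = -bloco
--         else:
--             min_torres.append(-bloco)  # Adiciono em O(1)
--
--     num_min_torres = len(min_torres)  # Calculo o tamanho da lista em O(1)
--
--     return num_min_torres
-- ===== SOURCE B (Python) =====
-- from typing import List, Tuple
--
-- def problema_5(blocos: List[int]) -> int:
--     # Quadratic DP: the answer is the length of the longest non-increasing
--     # subsequence; pairs holds (value, best chain length ending at that value).
--     pairs = []
--     best = 0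
--     for x in blocos:
--         cur = 1 + max((d for v, d in pairs if v >= x), default=0)
--         pairs.append((x, cur))
--         if cur > best:
--             best = cur
--     return best
-- ===== Notes on version B (the rewrite author's own statement) =====
-- stated objective: simpler
-- what changed: Replaced A's patience-sorting pass with a hand-rolled binary search over a list of negated tower tops by the classic quadratic dynamic program for the longest non-increasing subsequence (for each element, 1 + best chain length over earlier elements with value >= it, answer = overall best).
import Mathlib
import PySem

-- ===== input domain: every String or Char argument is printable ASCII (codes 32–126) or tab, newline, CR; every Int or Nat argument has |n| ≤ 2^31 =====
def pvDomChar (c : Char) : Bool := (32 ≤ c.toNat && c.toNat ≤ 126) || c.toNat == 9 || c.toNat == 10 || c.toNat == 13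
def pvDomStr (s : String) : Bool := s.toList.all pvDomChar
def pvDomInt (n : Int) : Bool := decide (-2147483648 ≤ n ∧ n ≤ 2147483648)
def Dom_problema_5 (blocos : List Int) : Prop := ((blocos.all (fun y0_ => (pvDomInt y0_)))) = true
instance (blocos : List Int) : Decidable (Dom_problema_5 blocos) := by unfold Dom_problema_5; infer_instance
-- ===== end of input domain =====

-- B replaces A's patience-sorting/binary-search pass by the classic quadratic DP for the
-- longest non-increasing subsequence (simpler, no binary search); same return value.

-- ===== PORT A =====
-- A's local helper `adicionar_mais_a_direita`: bisect-right binary search.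
def pvBusca (arr : List Int) (x : Int) (inicio fim : Nat) : Nat :=
  if h : inicio < fim then
    let meio := (inicio + fim) / 2
    if x < arr.getD meio 0 then pvBusca arr x inicio meio
    else pvBusca arr x (meio + 1) fim
  else inicio
termination_by fim - inicio
decreasing_by all_goals omega

-- A's loop body: place -bloco on the tops list (indexing is always in range here).
def pvAStep (t : List Int) (y : Int) : List Int :=
  let i := pvBusca t y 0 t.length
  if i < t.length then t.set i y else t ++ [y]

def problema_5 (blocos : List Int) : Int :=
  ((blocos.foldl (fun t bloco => pvAStep t (-bloco)) []).length : Int)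

-- ===== PORT B =====
-- Source B's `max((d for v, d in pairs if v >= x), default=0)`
def pvMaxGE (pairs : List (Int × Int)) (x : Int) : Int :=
  pairs.foldl (fun m p => if p.1 ≥ x then max m p.2 else m) 0

-- B's loop body on state (pairs, best)
def pvBStep (st : List (Int × Int) × Int) (x : Int) : List (Int × Int) × Int :=
  let cur := 1 + pvMaxGE st.1 x
  (st.1 ++ [(x, cur)], if cur > st.2 then cur else st.2)

def problema_5_alt (blocos : List Int) : Int :=
  (blocos.foldl pvBStep ([], 0)).2

-- ===== PRECONDITION & SPEC =====
def Spec_problema_5 (blocos : List Int) (out : Int) : Prop := out = problema_5_alt blocos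
instance (blocos : List Int) (out : Int) : Decidable (Spec_problema_5 blocos out) := by unfold Spec_problema_5; infer_instance

-- ===== CLAIM (what is proved, stated in full; the proofs are below) =====
def Claim_equal_problema_5 : Prop := ∀ (blocos : List Int), Dom_problema_5 blocos → Spec_problema_5 blocos (problema_5 blocos)

-- ===== LEMMAS AND PROOFS =====

-- "There is a subsequence of l that is an R-chain of length k ending in value v."
def AchR (R : Int → Int → Prop) (l : List Int) (k : Nat) (v : Int) : Prop :=
  ∃ s : List Int, s.Sublist l ∧ s.IsChain R ∧ s.length = k ∧ s.getLast? = some v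

theorem achR_zero (R : Int → Int → Prop) (l : List Int) (v : Int) : ¬ AchR R l 0 v := by
  rintro ⟨s, -, -, hlen, hlast⟩
  cases s with
  | nil => simp at hlast
  | cons a s => simp at hlen

theorem achR_nil (R : Int → Int → Prop) (k : Nat) (v : Int) : ¬ AchR R [] k v := by
  rintro ⟨s, hs, -, -, hlast⟩
  rw [List.sublist_nil] at hs
  subst hs; simp at hlast

theorem achR_mono (R : Int → Int → Prop) (l : List Int) (x : Int) (k : Nat) (v : Int)
    (h : AchR R l k v) : AchR R (l ++ [x]) k v := by
  obtain ⟨s, hs, hc, hlen, hlast⟩ := h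
  exact ⟨s, hs.trans (List.sublist_append_left _ _), hc, hlen, hlast⟩

theorem achR_single (R : Int → Int → Prop) (l : List Int) (x : Int) : AchR R (l ++ [x]) 1 x := by
  refine ⟨[x], ?_, ?_, rfl, rfl⟩
  · exact (List.sublist_append_right l [x])
  · simp

theorem achR_snoc (R : Int → Int → Prop) (l : List Int) (x w : Int) (k : Nat)
    (h : AchR R l k w) (hR : R w x) : AchR R (l ++ [x]) (k + 1) x := by
  obtain ⟨s, hs, hc, hlen, hlast⟩ := h
  refine ⟨s ++ [x], hs.append (List.Sublist.refl [x]), ?_, by simp [hlen], by simp⟩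
  rw [List.isChain_append]
  refine ⟨hc, by simp, ?_⟩
  intro a ha b hb
  simp at hb
  rw [hlast] at ha; simp at ha
  subst ha; subst hb; exact hR

theorem achR_append_iff (R : Int → Int → Prop) (l : List Int) (x : Int) (k : Nat) (v : Int) :
    AchR R (l ++ [x]) k v ↔
      AchR R l k v ∨ (v = x ∧ (k = 1 ∨ ∃ w, R w x ∧ AchR R l (k - 1) w)) := by
  constructor
  · rintro ⟨s, hs, hc, hlen, hlast⟩
    rw [List.sublist_append_iff] at hs
    obtain ⟨s₁, s₂, rfl, hs₁, hs₂⟩ := hs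
    rcases List.sublist_singleton.mp hs₂ with rfl | rfl
    · rw [List.append_nil] at hc hlen hlast
      exact Or.inl ⟨s₁, hs₁, hc, hlen, hlast⟩
    · rw [List.getLast?_concat] at hlast
      injection hlast with hvx
      refine Or.inr ⟨hvx.symm, ?_⟩
      rw [List.isChain_append] at hc
      obtain ⟨hc₁, -, hrel⟩ := hc
      cases hs₁1 : s₁ with
      | nil =>
          left; subst hs₁1; simpa using hlen.symm
      | cons a s' =>
          right
          have hne : s₁ ≠ [] := by simp [hs₁1]
          obtain ⟨w, hw⟩ := Option.isSome_iff_exists.mp (List.getLast?_isSome.mpr hne)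
          refine ⟨w, ?_, s₁, hs₁, hc₁, ?_, hw⟩
          · exact hrel w hw x (by simp)
          · have : s₁.length + 1 = k := by simpa using hlen
            omega
  · rintro (h | ⟨hvx, h⟩)
    · exact achR_mono R l x k v h
    · subst hvx
      rcases h with rfl | ⟨w, hR, hw⟩
      · exact achR_single R l v
      · rcases k with _ | k'
        · exact absurd hw (achR_zero R l w)
        · simpa using achR_snoc R l v w k' (by simpa using hw) hR

-- negation bridge: non-decreasing chains of the negated list are non-increasing chains
theorem achR_map_neg (l : List Int) (k : Nat) (v : Int) :
    AchR (· ≤ ·) (l.map (fun z => -z)) k v ↔ AchR (· ≥ ·) l k (-v) := by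
  constructor
  · rintro ⟨s, hs, hc, hlen, hlast⟩
    obtain ⟨s', hs', rfl⟩ := List.sublist_map_iff.mp hs
    refine ⟨s', hs', ?_, by simpa using hlen, ?_⟩
    · exact ((List.isChain_map _).mp hc).imp (fun a b h => by omega)
    · rw [List.getLast?_map] at hlast
      cases h : s'.getLast? with
      | none => rw [h] at hlast; simp at hlast
      | some w =>
          rw [h] at hlast
          simp only [Option.map_some] at hlast
          injection hlast with hw
          exact congrArg some (by omega)
  · rintro ⟨s, hs, hc, hlen, hlast⟩
    refine ⟨s.map (fun z => -z), hs.map _, ?_, by simpa using hlen, ?_⟩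
    · exact (List.isChain_map _).mpr (hc.imp (fun a b h => by omega))
    · rw [List.getLast?_map, hlast]; simp

-- getD on in-range indices
theorem getD_lt (t : List Int) {k : Nat} (h : k < t.length) : t.getD k 0 = t[k] :=
  List.getD_eq_getElem t 0 h

theorem sorted_getD (arr : List Int) (hs : arr.IsChain (· ≤ ·)) {i j : Nat}
    (hij : i ≤ j) (hj : j < arr.length) : arr.getD i 0 ≤ arr.getD j 0 := by
  rcases Nat.eq_or_lt_of_le hij with rfl | hlt
  · exact le_refl _
  · rw [getD_lt _ (lt_of_le_of_lt hij hj), getD_lt _ hj]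
    exact List.pairwise_iff_getElem.mp (List.isChain_iff_pairwise.mp hs) i j
      (lt_of_le_of_lt hij hj) hj hlt

theorem isChain_of_getD (t : List Int)
    (h : ∀ i j, i < j → j < t.length → t.getD i 0 ≤ t.getD j 0) : t.IsChain (· ≤ ·) := by
  rw [List.isChain_iff_pairwise, List.pairwise_iff_getElem]
  intro i j hi hj hij
  have := h i j hij hj
  rwa [getD_lt _ hi, getD_lt _ hj] at this

theorem pvBusca_spec (arr : List Int) (x : Int) (hs : arr.IsChain (· ≤ ·)) :
    ∀ n inicio fim, fim - inicio = n → inicio ≤ fim → fim ≤ arr.length →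
    (∀ k, k < inicio → arr.getD k 0 ≤ x) →
    (∀ k, fim ≤ k → k < arr.length → x < arr.getD k 0) →
    inicio ≤ pvBusca arr x inicio fim ∧ pvBusca arr x inicio fim ≤ fim ∧
    (∀ k, k < pvBusca arr x inicio fim → arr.getD k 0 ≤ x) ∧
    (pvBusca arr x inicio fim < arr.length → x < arr.getD (pvBusca arr x inicio fim) 0) := by
  intro n
  induction n using Nat.strong_induction_on with
  | _ n ih =>
    intro inicio fim hn hif hlen hlow hhigh
    rw [pvBusca]
    by_cases h : inicio < fim
    · rw [dif_pos h]
      have hm1 : inicio ≤ (inicio + fim) / 2 := by omega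
      have hm2 : (inicio + fim) / 2 < fim := by omega
      have hmlt : (inicio + fim) / 2 < arr.length := lt_of_lt_of_le hm2 hlen
      by_cases hx : x < arr.getD ((inicio + fim) / 2) 0
      · simp only [if_pos hx]
        have hhigh' : ∀ k, (inicio + fim) / 2 ≤ k → k < arr.length → x < arr.getD k 0 := by
          intro k hk hklen
          exact lt_of_lt_of_le hx (sorted_getD arr hs hk hklen)
        have := ih ((inicio + fim) / 2 - inicio) (by omega) inicio ((inicio + fim) / 2)
          rfl hm1 (le_of_lt (lt_of_lt_of_le hm2 hlen)) hlow hhigh'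
        exact ⟨this.1, le_trans this.2.1 (le_of_lt hm2), this.2.2⟩
      · simp only [if_neg hx]
        have hlow' : ∀ k, k < (inicio + fim) / 2 + 1 → arr.getD k 0 ≤ x := by
          intro k hk
          exact le_trans (sorted_getD arr hs (by omega) hmlt) (not_lt.mp hx)
        have := ih (fim - ((inicio + fim) / 2 + 1)) (by omega) ((inicio + fim) / 2 + 1) fim
          rfl (by omega) hlen hlow' hhigh
        exact ⟨le_trans (by omega) this.1, this.2.1, this.2.2⟩
    · rw [dif_neg h]
      have heq : inicio = fim := by omega
      refine ⟨le_refl _, by omega, fun k hk => hlow k hk, fun hlt => hhigh inicio (by omega) hlt⟩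

-- invariant carried by A's tops list
def InvA (l t : List Int) : Prop :=
  t.IsChain (· ≤ ·) ∧
  (∀ k, k < t.length → AchR (· ≤ ·) l (k + 1) (t.getD k 0)) ∧
  (∀ k v, AchR (· ≤ ·) l (k + 1) v → k < t.length ∧ t.getD k 0 ≤ v)

theorem invA_nil : InvA [] [] := by
  refine ⟨by simp, by simp, ?_⟩
  intro k v h
  exact absurd h (achR_nil _ _ _)

theorem invA_step (l t : List Int) (x : Int) (h : InvA l t) : InvA (l ++ [x]) (pvAStep t x) := by
  obtain ⟨hs, hreal, hdom⟩ := h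
  obtain ⟨-, hile, hlow, hhigh⟩ := pvBusca_spec t x hs (t.length - 0) 0 t.length rfl
    (Nat.zero_le _) le_rfl
    (fun k hk => absurd hk (Nat.not_lt_zero k))
    (fun k h1 h2 => absurd (lt_of_le_of_lt h1 h2) (lt_irrefl _))
  unfold pvAStep
  by_cases hc : pvBusca t x 0 t.length < t.length
  · rw [if_pos hc]
    set i := pvBusca t x 0 t.length with hidef
    have hget : ∀ k, k < t.length → (t.set i x).getD k 0 = if i = k then x else t.getD k 0 := by
      intro k hk
      rw [getD_lt _ (by rw [List.length_set]; exact hk), List.getElem_set]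
      split
      · rfl
      · exact (getD_lt t hk).symm
    refine ⟨?_, ?_, ?_⟩
    · apply isChain_of_getD
      intro a b hab hblen
      rw [List.length_set] at hblen
      rw [hget a (by omega), hget b hblen]
      by_cases hai : i = a
      · rw [if_pos hai, if_neg (by omega)]
        exact le_of_lt (lt_of_lt_of_le (hhigh hc) (sorted_getD t hs (by omega) hblen))
      · rw [if_neg hai]
        by_cases hbi : i = b
        · rw [if_pos hbi]
          exact hlow a (by omega)
        · rw [if_neg hbi]
          exact sorted_getD t hs (le_of_lt hab) hblen
    · intro k hk
      rw [List.length_set] at hk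
      rw [hget k hk]
      by_cases hki : i = k
      · rw [if_pos hki]
        subst hki
        rcases Nat.eq_zero_or_pos i with hz | hpos
        · rw [hz]
          exact achR_single _ l x
        · have h2' : AchR (· ≤ ·) l i (t.getD (i - 1) 0) := by
            have := hreal (i - 1) (by omega)
            rwa [Nat.sub_add_cancel hpos] at this
          exact achR_snoc _ l x _ i h2' (hlow (i - 1) (by omega))
      · rw [if_neg hki]
        exact achR_mono _ l x _ _ (hreal k hk)
    · intro k v hach
      rw [achR_append_iff] at hach
      rcases hach with hold | ⟨hvx, hcase⟩
      · obtain ⟨hk, hle⟩ := hdom k v hold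
        refine ⟨by rw [List.length_set]; exact hk, ?_⟩
        rw [hget k hk]
        by_cases hki : i = k
        · rw [if_pos hki]
          subst hki
          exact le_trans (le_of_lt (hhigh hc)) hle
        · rw [if_neg hki]
          exact hle
      · rcases hcase with h1 | ⟨w, hwx, hw⟩
        · have hk0 : k = 0 := by omega
          subst hk0
          refine ⟨by rw [List.length_set]; omega, ?_⟩
          rw [hget 0 (by omega)]
          by_cases hi0 : i = 0
          · rw [if_pos hi0, hvx]
          · rw [if_neg hi0, hvx]
            exact hlow 0 (by omega)
        · rcases k with _ | k'
          · exact absurd (by simpa using hw) (achR_zero _ l w)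
          · have hw' : AchR (· ≤ ·) l (k' + 1) w := by simpa using hw
            obtain ⟨hk', hle'⟩ := hdom k' w hw'
            have hki : k' + 1 ≤ i := by
              by_contra hcon
              have h1 : i ≤ k' := by omega
              have := lt_of_lt_of_le (hhigh hc) (sorted_getD t hs h1 hk')
              omega
            refine ⟨by rw [List.length_set]; omega, ?_⟩
            rw [hget (k' + 1) (by omega)]
            by_cases heq : i = k' + 1
            · rw [if_pos heq, hvx]
            · rw [if_neg heq, hvx]
              exact hlow (k' + 1) (by omega)
  · rw [if_neg hc]
    have hieq : pvBusca t x 0 t.length = t.length := by omega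
    rw [hieq] at hlow
    have haux : ∀ k, k ≤ t.length → (t ++ [x]).getD k 0 = if k = t.length then x else t.getD k 0 := by
      intro k hk
      rcases Nat.lt_or_ge k t.length with hlt | hge
      · rw [getD_lt _ (by simp; omega), List.getElem_append_left hlt, if_neg (by omega), getD_lt _ hlt]
      · have hkeq : k = t.length := by omega
        subst hkeq
        rw [getD_lt _ (by simp), List.getElem_append_right le_rfl, if_pos rfl]
        simp
    refine ⟨?_, ?_, ?_⟩
    · apply isChain_of_getD
      intro a b hab hblen
      rw [List.length_append, List.length_singleton] at hblen
      rw [haux a (by omega), haux b (by omega), if_neg (by omega)]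
      by_cases hbl : b = t.length
      · rw [if_pos hbl]
        exact hlow a (by omega)
      · rw [if_neg hbl]
        exact sorted_getD t hs (le_of_lt hab) (by omega)
    · intro k hk
      rw [List.length_append, List.length_singleton] at hk
      rw [haux k (by omega)]
      by_cases hkl : k = t.length
      · rw [if_pos hkl]
        subst hkl
        rcases Nat.eq_zero_or_pos t.length with hz | hpos
        · rw [hz]
          exact achR_single _ l x
        · have h2' : AchR (· ≤ ·) l t.length (t.getD (t.length - 1) 0) := by
            have := hreal (t.length - 1) (by omega)
            rwa [Nat.sub_add_cancel hpos] at this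
          exact achR_snoc _ l x _ t.length h2' (hlow (t.length - 1) (by omega))
      · rw [if_neg hkl]
        exact achR_mono _ l x _ _ (hreal k (by omega))
    · intro k v hach
      rw [achR_append_iff] at hach
      rcases hach with hold | ⟨hvx, hcase⟩
      · obtain ⟨hk, hle⟩ := hdom k v hold
        refine ⟨by rw [List.length_append, List.length_singleton]; omega, ?_⟩
        rw [haux k (by omega), if_neg (by omega)]
        exact hle
      · rcases hcase with h1 | ⟨w, hwx, hw⟩
        · have hk0 : k = 0 := by omega
          subst hk0
          refine ⟨by simp, ?_⟩
          rw [haux 0 (by omega)]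
          by_cases hl0 : (0 : Nat) = t.length
          · rw [if_pos hl0, hvx]
          · rw [if_neg hl0, hvx]
            exact hlow 0 (by omega)
        · rcases k with _ | k'
          · exact absurd (by simpa using hw) (achR_zero _ l w)
          · have hw' : AchR (· ≤ ·) l (k' + 1) w := by simpa using hw
            obtain ⟨hk', hle'⟩ := hdom k' w hw'
            refine ⟨by rw [List.length_append, List.length_singleton]; omega, ?_⟩
            rw [haux (k' + 1) (by omega)]
            by_cases heq : k' + 1 = t.length
            · rw [if_pos heq, hvx]
            · rw [if_neg heq, hvx]
              exact hlow (k' + 1) (by omega)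

theorem invA_all (l : List Int) : InvA l (l.foldl pvAStep []) := by
  induction l using List.reverseRecOn with
  | nil => exact invA_nil
  | append_singleton l x ih =>
      rw [List.foldl_append]
      exact invA_step _ _ _ ih

-- characterisation of B's inner fold (max of qualifying d's, default 0)
theorem pvMaxGE_spec (pairs : List (Int × Int)) (x : Int) :
    0 ≤ pvMaxGE pairs x ∧
    (∀ p ∈ pairs, x ≤ p.1 → p.2 ≤ pvMaxGE pairs x) ∧
    (pvMaxGE pairs x = 0 ∨ ∃ p ∈ pairs, x ≤ p.1 ∧ p.2 = pvMaxGE pairs x) := by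
  have go : ∀ (ps : List (Int × Int)) (m : Int),
      m ≤ ps.foldl (fun m p => if p.1 ≥ x then max m p.2 else m) m ∧
      (∀ p ∈ ps, x ≤ p.1 → p.2 ≤ ps.foldl (fun m p => if p.1 ≥ x then max m p.2 else m) m) ∧
      (ps.foldl (fun m p => if p.1 ≥ x then max m p.2 else m) m = m ∨
        ∃ p ∈ ps, x ≤ p.1 ∧ p.2 = ps.foldl (fun m p => if p.1 ≥ x then max m p.2 else m) m) := by
    intro ps
    induction ps with
    | nil => intro m; simp
    | cons q qs ih =>
        intro m
        simp only [List.foldl_cons]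
        by_cases hq : q.1 ≥ x
        · rw [if_pos hq]
          obtain ⟨h1, h2, h3⟩ := ih (max m q.2)
          refine ⟨le_trans (le_max_left _ _) h1, ?_, ?_⟩
          · intro p hp hpx
            rcases List.mem_cons.mp hp with rfl | hp'
            · exact le_trans (le_max_right _ _) h1
            · exact h2 p hp' hpx
          · rcases h3 with heq | ⟨p, hp, hpx, hpe⟩
            · rcases max_choice m q.2 with hm | hm
              · exact Or.inl (heq.trans hm)
              · exact Or.inr ⟨q, List.mem_cons_self, hq, (heq.trans hm).symm⟩
            · exact Or.inr ⟨p, List.mem_cons_of_mem _ hp, hpx, hpe⟩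
        · rw [if_neg hq]
          obtain ⟨h1, h2, h3⟩ := ih m
          refine ⟨h1, ?_, ?_⟩
          · intro p hp hpx
            rcases List.mem_cons.mp hp with rfl | hp'
            · exact absurd hpx hq
            · exact h2 p hp' hpx
          · rcases h3 with heq | ⟨p, hp, hpx, hpe⟩
            · exact Or.inl heq
            · exact Or.inr ⟨p, List.mem_cons_of_mem _ hp, hpx, hpe⟩
  obtain ⟨h1, h2, h3⟩ := go pairs 0
  exact ⟨h1, h2, h3⟩

-- invariant carried by B's state
def InvB (l : List Int) (st : List (Int × Int) × Int) : Prop :=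
  (∀ p ∈ st.1, 1 ≤ p.2 ∧ AchR (· ≥ ·) l p.2.toNat p.1) ∧
  (∀ k v, AchR (· ≥ ·) l (k + 1) v → ∃ p ∈ st.1, p.1 = v ∧ ((k : Int) + 1) ≤ p.2) ∧
  0 ≤ st.2 ∧
  (∀ k v, AchR (· ≥ ·) l k v → (k : Int) ≤ st.2) ∧
  (st.2 = 0 ∨ ∃ v, AchR (· ≥ ·) l st.2.toNat v)

theorem invB_nil : InvB [] ([], 0) := by
  refine ⟨by simp, ?_, by simp, ?_, Or.inl rfl⟩
  · intro k v h; exact absurd h (achR_nil _ _ _)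
  · intro k v h; exact absurd h (achR_nil _ _ _)

theorem invB_step (l : List Int) (st : List (Int × Int) × Int) (x : Int)
    (h : InvB l st) : InvB (l ++ [x]) (pvBStep st x) := by
  obtain ⟨hB1, hB2, hb0, hB4, hB5⟩ := h
  obtain ⟨hm0, hub, hwit⟩ := pvMaxGE_spec st.1 x
  have hnew : AchR (· ≥ ·) (l ++ [x]) (1 + pvMaxGE st.1 x).toNat x := by
    rcases hwit with hz | ⟨p, hp, hpx, hpe⟩
    · rw [hz]
      simpa using achR_single (· ≥ ·) l x
    · obtain ⟨hp1, hpach⟩ := hB1 p hp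
      have ht : (1 + pvMaxGE st.1 x).toNat = p.2.toNat + 1 := by omega
      rw [ht]
      exact achR_snoc _ l x p.1 p.2.toNat hpach hpx
  have h1' : ∀ p ∈ st.1 ++ [(x, 1 + pvMaxGE st.1 x)],
      1 ≤ p.2 ∧ AchR (· ≥ ·) (l ++ [x]) p.2.toNat p.1 := by
    intro p hp
    rcases List.mem_append.mp hp with hp' | hp'
    · obtain ⟨ha, hb⟩ := hB1 p hp'
      exact ⟨ha, achR_mono _ l x _ _ hb⟩
    · have : p = (x, 1 + pvMaxGE st.1 x) := by simpa using hp'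
      subst this
      exact ⟨by simpa using (by omega : (1:Int) ≤ 1 + pvMaxGE st.1 x), hnew⟩
  have h2' : ∀ k v, AchR (· ≥ ·) (l ++ [x]) (k + 1) v →
      ∃ p ∈ st.1 ++ [(x, 1 + pvMaxGE st.1 x)], p.1 = v ∧ ((k : Int) + 1) ≤ p.2 := by
    intro k v hach
    rw [achR_append_iff] at hach
    rcases hach with hold | ⟨hvx, hcase⟩
    · obtain ⟨p, hp, hpv, hple⟩ := hB2 k v hold
      exact ⟨p, List.mem_append_left _ hp, hpv, hple⟩
    · refine ⟨(x, 1 + pvMaxGE st.1 x), List.mem_append_right _ (by simp), hvx.symm, ?_⟩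
      rcases hcase with h1 | ⟨w, hwx, hw⟩
      · have : k = 0 := by omega
        subst this; push_cast; omega
      · rcases k with _ | k'
        · exact absurd (by simpa using hw) (achR_zero _ l w)
        · obtain ⟨p, hp, hpv, hple⟩ := hB2 k' w (by simpa using hw)
          have hpm := hub p hp (by rw [hpv]; exact hwx)
          push_cast at hple ⊢
          omega
  have hpb : ∀ p ∈ st.1, p.2 ≤ st.2 := by
    intro p hp
    obtain ⟨ha, hb⟩ := hB1 p hp
    have := hB4 p.2.toNat p.1 hb
    omega
  show InvB (l ++ [x]) (st.1 ++ [(x, 1 + pvMaxGE st.1 x)],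
    if 1 + pvMaxGE st.1 x > st.2 then 1 + pvMaxGE st.1 x else st.2)
  unfold InvB
  refine ⟨h1', h2', by split_ifs <;> omega, ?_, ?_⟩
  · intro k v hach
    rcases k with _ | k'
    · split_ifs <;> (push_cast; omega)
    · obtain ⟨p, hp, hpv, hple⟩ := h2' k' v hach
      rcases List.mem_append.mp hp with hp' | hp'
      · have := hpb p hp'
        split_ifs <;> (push_cast at hple ⊢; omega)
      · have : p = (x, 1 + pvMaxGE st.1 x) := by simpa using hp'
        subst this
        split_ifs <;> (push_cast at hple ⊢; simp at hple ⊢; omega)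
  · by_cases hcb : 1 + pvMaxGE st.1 x > st.2
    · rw [if_pos hcb]
      exact Or.inr ⟨x, hnew⟩
    · rw [if_neg hcb]
      rcases hB5 with h0 | ⟨v, hv⟩
      · exact absurd h0 (by omega)
      · exact Or.inr ⟨v, achR_mono _ l x _ _ hv⟩

theorem invB_all (l : List Int) : InvB l (l.foldl pvBStep ([], 0)) := by
  induction l using List.reverseRecOn with
  | nil => exact invB_nil
  | append_singleton l x ih =>
      rw [List.foldl_append]
      exact invB_step _ _ _ ih

theorem main_eq (blocos : List Int) : problema_5 blocos = problema_5_alt blocos := by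
  unfold problema_5 problema_5_alt
  rw [show blocos.foldl (fun t bloco => pvAStep t (-bloco)) [] =
      (blocos.map (fun z => -z)).foldl pvAStep [] from (List.foldl_map).symm]
  obtain ⟨hsA, hreal, hdom⟩ := invA_all (blocos.map (fun z => -z))
  obtain ⟨hB1, hB2, hb0, hB4, hB5⟩ := invB_all blocos
  set t := (blocos.map (fun z => -z)).foldl pvAStep [] with ht
  set st := blocos.foldl pvBStep ([], 0) with hst
  apply le_antisymm
  · rcases Nat.eq_zero_or_pos t.length with hz | hpos
    · rw [hz]
      simpa using hb0
    · have hach := hreal (t.length - 1) (by omega)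
      rw [Nat.sub_add_cancel hpos] at hach
      exact hB4 t.length _ ((achR_map_neg blocos _ _).mp hach)
  · rcases hB5 with h0 | ⟨v, hv⟩
    · rw [h0]
      exact_mod_cast Nat.zero_le _
    · have hn1 : 1 ≤ st.2.toNat := by
        by_contra hcon
        have hz : st.2.toNat = 0 := by omega
        rw [hz] at hv
        exact achR_zero _ _ _ hv
      have hle' : AchR (· ≤ ·) (blocos.map (fun z => -z)) (st.2.toNat - 1 + 1) (-v) := by
        rw [Nat.sub_add_cancel hn1, achR_map_neg, neg_neg]
        exact hv
      obtain ⟨hk, -⟩ := hdom (st.2.toNat - 1) (-v) hle'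
      omega

-- ===== VERDICT (by name: the statement is the Claim_ definition above) =====
theorem problema_5_spec : Claim_equal_problema_5 := by
  intro blocos _
  unfold Spec_problema_5
  exact main_eq blocos
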